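-- pv_equiv track=rewrite | github.com/cel34-bath/PythonMaple | PythonTools/WorkWithMaple/polynomials/polynomial_characteristics.py | number_of_terms
-- ===== SOURCE A (Python) =====
-- def number_of_terms(polynomial:list=[]):
--     '''This function counts the number of terms of a polynomial given in matricial form'''
--
--     degrees = [monomial[:-1] for monomial in polynomial]
--     unique_degrees = []
--     coefficients = []
--     for monomial in polynomial:
--         if monomial[:-1] not in unique_degrees:
--             unique_degrees.append(monomial[:-1])
--             coefficients.append(monomial[-1])
--         else:
--             coefficients[unique_degrees.index(monomial[:-1])] += monomial[-1]
--
--     return len([coeff for coeff in coefficients if coeff!=0])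
-- ===== SOURCE B (Python) =====
-- def number_of_terms(polynomial: list = []):
--     '''Counts the terms of a polynomial in matricial form whose aggregated
--     coefficient is nonzero: sort the monomials by their degree key, then scan
--     once, summing each contiguous run of equal degrees and counting runs
--     with a nonzero sum.'''
--     ordered = sorted(polynomial, key=lambda m: m[:-1])
--     count = 0
--     i = 0
--     n = len(ordered)
--     while i < n:
--         key = ordered[i][:-1]
--         total = 0
--         while i < n and ordered[i][:-1] == key:
--             total += ordered[i][-1]
--             i += 1
--         if total != 0:
--             count += 1
--     return count
-- ===== Notes on version B (the rewrite author's own statement) =====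
-- stated objective: alternative
-- what changed: B sorts the monomials once by their degree key and counts contiguous equal-degree runs with nonzero coefficient sum in one grouped scan, instead of A's per-monomial membership test and list.index scan over parallel unique_degrees/coefficients lists; it trades A's repeated list scans for an O(n log n) sort.
import Mathlib
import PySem

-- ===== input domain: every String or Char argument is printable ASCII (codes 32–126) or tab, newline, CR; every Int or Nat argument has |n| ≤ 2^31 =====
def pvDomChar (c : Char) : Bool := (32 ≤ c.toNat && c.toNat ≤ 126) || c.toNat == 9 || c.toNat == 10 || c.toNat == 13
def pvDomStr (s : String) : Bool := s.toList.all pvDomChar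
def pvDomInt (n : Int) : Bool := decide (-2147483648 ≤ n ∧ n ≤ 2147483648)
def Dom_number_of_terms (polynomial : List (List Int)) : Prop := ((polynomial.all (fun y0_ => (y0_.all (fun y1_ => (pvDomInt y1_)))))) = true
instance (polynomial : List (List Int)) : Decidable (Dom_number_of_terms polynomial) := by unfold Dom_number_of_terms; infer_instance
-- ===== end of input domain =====

-- B sorts the monomials by their degree key and counts contiguous equal-degree runs with a
-- nonzero coefficient sum, instead of A's membership/index scans over parallel lists
-- (a different algorithm of similar measured cost; return value only, no mutation).

-- ===== PORT A =====
-- loop body: if monomial[:-1] not in unique_degrees: append degree and coefficient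
--            else: coefficients[unique_degrees.index(monomial[:-1])] += monomial[-1]
-- (monomial[-1] raises IndexError on an empty monomial — excluded by Pre_; .getD 0 is never hit inside Pre_)
def ntA_step (st : List (List Int) × List Int) (mon : List Int) : List (List Int) × List Int :=
  let deg := PySem.List.slice mon none (some (-1))
  if deg ∉ st.1 then
    (st.1 ++ [deg], st.2 ++ [(PySem.List.pyGet? mon (-1)).getD 0])
  else
    match PySem.List.index? st.1 deg with
    | some i => (st.1, st.2.set i (st.2.getD i 0 + (PySem.List.pyGet? mon (-1)).getD 0))
    | none => st  -- unreachable: deg ∈ st.1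

def number_of_terms (polynomial : List (List Int)) : Int :=
  let _degrees := polynomial.map (fun m => PySem.List.slice m none (some (-1)))  -- A's dead 'degrees' list
  let st := polynomial.foldl ntA_step ([], [])
  ((st.2.filter (fun coeff => decide (coeff ≠ 0))).length : Int)

-- ===== PORT B =====
-- outer while loop over the sorted list: the inner 'while … ordered[i][:-1] == key' run is the
-- takeWhile prefix, the next outer iteration resumes at the dropWhile suffix
def ntB_go : List (List Int) → Int
  | [] => 0
  | m :: rest =>
    let key := PySem.List.slice m none (some (-1))
    let run := rest.takeWhile (fun x => PySem.List.slice x none (some (-1)) == key)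
    let total := (PySem.List.pyGet? m (-1)).getD 0 + (run.map (fun x => (PySem.List.pyGet? x (-1)).getD 0)).sum
    (if total ≠ 0 then (1 : Int) else 0) +
      ntB_go (rest.dropWhile (fun x => PySem.List.slice x none (some (-1)) == key))
  termination_by l => l.length
  decreasing_by
    simp only [List.length_cons]
    exact Nat.lt_succ_of_le (List.length_dropWhile_le _ _)

def number_of_terms_alt (polynomial : List (List Int)) : Int :=
  let ordered := PySem.List.sorted polynomial (fun m => PySem.List.slice m none (some (-1))) false
  ntB_go ordered

-- ===== PRECONDITION & SPEC =====
-- Pre_ excludes polynomials containing an empty monomial: there monomial[-1]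
-- raises IndexError in A (and in B alike).
def Pre_number_of_terms (polynomial : List (List Int)) : Prop :=
  ∀ m ∈ polynomial, m ≠ []
instance (polynomial : List (List Int)) : Decidable (Pre_number_of_terms polynomial) := by unfold Pre_number_of_terms; infer_instance

def pvWitness_number_of_terms : List (List Int) := [[1, 2], [1, 3], [0, 5], [1, -5]]

def Spec_number_of_terms (polynomial : List (List Int)) (out : Int) : Prop := out = number_of_terms_alt polynomial
instance (polynomial : List (List Int)) (out : Int) : Decidable (Spec_number_of_terms polynomial out) := by unfold Spec_number_of_terms; infer_instance

-- ===== CLAIM (what is proved, stated in full; the proofs are below) =====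
def Claim_equal_number_of_terms : Prop := ∀ (polynomial : List (List Int)), Dom_number_of_terms polynomial → Pre_number_of_terms polynomial → Spec_number_of_terms polynomial (number_of_terms polynomial)

-- ===== LEMMAS AND PROOFS =====

-- degree key and coefficient of a monomial
def ntK (m : List Int) : List Int := PySem.List.slice m none (some (-1))
def ntC (m : List Int) : Int := (PySem.List.pyGet? m (-1)).getD 0
-- total coefficient of degree d in l
def ntS (l : List (List Int)) (d : List Int) : Int :=
  ((l.filter (fun m => ntK m = d)).map ntC).sum
-- first-occurrence list of the degrees of l not already in u (A's fresh keys)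
def ntN (l : List (List Int)) (u : List (List Int)) : List (List Int) :=
  match l with
  | [] => []
  | m :: l' => if ntK m ∈ u then ntN l' u else ntK m :: ntN l' (u ++ [ntK m])

lemma ntN_cons (m : List Int) (l u : List (List Int)) :
    ntN (m :: l) u = if ntK m ∈ u then ntN l u else ntK m :: ntN l (u ++ [ntK m]) := rfl

lemma ntS_nil (d : List Int) : ntS [] d = 0 := rfl

lemma ntS_cons (m : List Int) (l : List (List Int)) (d : List Int) :
    ntS (m :: l) d = (if ntK m = d then ntC m else 0) + ntS l d := by
  by_cases h : ntK m = d <;> simp [ntS, h]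

lemma ntS_append (l1 l2 : List (List Int)) (d : List Int) :
    ntS (l1 ++ l2) d = ntS l1 d + ntS l2 d := by
  simp [ntS]

lemma ntS_eq_zero (l : List (List Int)) (d : List Int) (h : ∀ x ∈ l, ntK x ≠ d) :
    ntS l d = 0 := by
  have : l.filter (fun m => ntK m = d) = [] :=
    List.filter_eq_nil_iff.mpr (by intro x hx; simpa using h x hx)
  simp [ntS, this]

lemma ntS_eq_sum (l : List (List Int)) (d : List Int) (h : ∀ x ∈ l, ntK x = d) :
    ntS l d = (l.map ntC).sum := by
  have : l.filter (fun m => ntK m = d) = l :=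
    List.filter_eq_self.mpr (by intro x hx; simpa using h x hx)
  simp [ntS, this]

lemma ntS_perm (l1 l2 : List (List Int)) (d : List Int) (hp : l1.Perm l2) :
    ntS l1 d = ntS l2 d :=
  List.Perm.sum_eq (List.Perm.map ntC (List.Perm.filter _ hp))

lemma ntN_not_mem : ∀ (l u : List (List Int)), ∀ d ∈ ntN l u, d ∉ u := by
  intro l
  induction l with
  | nil => intro u d hd; simp [ntN] at hd
  | cons m l' ih =>
    intro u d hd
    simp only [ntN] at hd
    split_ifs at hd with h
    · exact ih u d hd
    · rw [List.mem_cons] at hd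
      rcases hd with rfl | hd
      · exact h
      · intro hu; exact ih (u ++ [ntK m]) d hd (by simp [hu])

lemma ntN_mem_iff : ∀ (l u : List (List Int)) (d : List Int),
    d ∈ ntN l u ↔ d ∉ u ∧ d ∈ l.map ntK := by
  intro l
  induction l with
  | nil => intro u d; simp [ntN]
  | cons m l' ih =>
    intro u d
    simp only [ntN]
    split_ifs with h
    · rw [ih]
      simp only [List.map_cons, List.mem_cons]
      constructor
      · rintro ⟨hu, hl⟩; exact ⟨hu, Or.inr hl⟩
      · rintro ⟨hu, rfl | hl⟩
        · exact absurd h hu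
        · exact ⟨hu, hl⟩
    · simp only [List.mem_cons, ih, List.mem_append, List.map_cons]
      constructor
      · rintro (rfl | ⟨hu, hl⟩)
        · exact ⟨h, Or.inl rfl⟩
        · exact ⟨fun hx => hu (Or.inl hx), Or.inr hl⟩
      · rintro ⟨hu, rfl | hl⟩
        · exact Or.inl rfl
        · by_cases hk : d = ntK m
          · exact Or.inl hk
          · exact Or.inr ⟨fun hx => (by rcases hx with hx | hx; exact hu hx; exact hk (by simpa using hx)), hl⟩

lemma ntN_nodup : ∀ (l u : List (List Int)), (ntN l u).Nodup := by
  intro l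
  induction l with
  | nil => intro u; simp [ntN]
  | cons m l' ih =>
    intro u
    simp only [ntN]
    split_ifs with h
    · exact ih u
    · refine List.nodup_cons.mpr ⟨?_, ih _⟩
      intro hmem
      exact ntN_not_mem l' (u ++ [ntK m]) _ hmem (by simp)

lemma zipWith_congr_left {α β γ : Type} (f g : α → β → γ) :
    ∀ (u : List α) (cs : List β), (∀ a ∈ u, ∀ b, f a b = g a b) →
    List.zipWith f u cs = List.zipWith g u cs := by
  intro u
  induction u with
  | nil => intro cs _; simp
  | cons a u' ih =>
    intro cs h
    cases cs with
    | nil => simp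
    | cons b cs' =>
      simp only [List.zipWith_cons_cons]
      rw [h a (by simp) b, ih cs' (fun a ha b => h a (by simp [ha]) b)]

lemma zipWith_snd_self {α : Type} (u : List α) (cs : List Int) (h : u.length = cs.length) :
    List.zipWith (fun _ c => c) u cs = cs := by
  induction u generalizing cs with
  | nil => cases cs with | nil => rfl | cons b t => simp at h
  | cons a u' ih => cases cs with
    | nil => simp at h
    | cons b t => simpa using ih t (by simpa using h)

-- updating slot i (the unique slot of key ntK m) realises the ntS step for m
lemma ntA_zip_set (m : List Int) (l' : List (List Int)) :
    ∀ (u : List (List Int)) (cs : List Int), u.Nodup → u.length = cs.length →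
    ∀ i, PySem.List.index? u (ntK m) = some i →
    List.zipWith (fun d c => c + ntS l' d) u (cs.set i (cs.getD i 0 + ntC m))
      = List.zipWith (fun d c => c + ntS (m :: l') d) u cs := by
  intro u
  induction u with
  | nil => intro cs _ _ i hi; simp [PySem.List.index?_eq_idxOf?] at hi
  | cons x u' ih =>
    intro cs hnd hlen i hi
    cases cs with
    | nil => simp at hlen
    | cons c cs' =>
      by_cases hx : x = ntK m
      · subst hx
        rw [PySem.List.index?_cons_self] at hi
        cases hi
        simp only [List.getD_cons_zero, List.set_cons_zero, List.zipWith_cons_cons]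
        congr 1
        · rw [ntS_cons]; simp; ring
        · apply zipWith_congr_left
          intro a ha b
          have hax : a ≠ ntK m := fun h => (List.nodup_cons.mp hnd).1 (h ▸ ha)
          rw [ntS_cons, if_neg (fun h => hax h.symm)]; ring
      · rw [PySem.List.index?_cons_of_ne u' hx] at hi
        cases hj : PySem.List.index? u' (ntK m) with
        | none => rw [hj] at hi; simp at hi
        | some j =>
          rw [hj] at hi
          simp only [Option.map_some] at hi
          cases hi
          simp only [List.getD_cons_succ, List.set_cons_succ, List.zipWith_cons_cons]
          congr 1
          · rw [ntS_cons, if_neg (fun h => hx h.symm)]; ring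
          · exact ih cs' (List.nodup_cons.mp hnd).2 (by simpa using hlen) j hj

-- A's loop invariant: the fold appends the fresh keys and accumulates ntS into each slot
lemma ntA_inv : ∀ (l u : List (List Int)) (cs : List Int), u.Nodup → u.length = cs.length →
    l.foldl ntA_step (u, cs)
      = (u ++ ntN l u, List.zipWith (fun d c => c + ntS l d) u cs ++ (ntN l u).map (ntS l)) := by
  intro l
  induction l with
  | nil =>
    intro u cs _ hlen
    simp only [List.foldl_nil, ntN, List.append_nil, List.map_nil]
    rw [zipWith_congr_left _ (fun _ c => c) u cs (by intro a _ b; rw [ntS_nil]; ring),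
      zipWith_snd_self u cs hlen]
  | cons m l' ih =>
    intro u cs hnd hlen
    rw [List.foldl_cons]
    by_cases hmem : ntK m ∈ u
    · have hsome : (PySem.List.index? u (ntK m)).isSome :=
        (PySem.List.index?_isSome_iff _ _).mpr hmem
      obtain ⟨i, hi⟩ := Option.isSome_iff_exists.mp hsome
      have hmem' : PySem.List.slice m none (some (-1)) ∈ u := hmem
      have hi' : PySem.List.index? u (PySem.List.slice m none (some (-1))) = some i := hi
      have hstep : ntA_step (u, cs) m
          = (u, cs.set i (cs.getD i 0 + ntC m)) := by
        simp only [ntA_step, ntC]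
        rw [if_neg (not_not_intro hmem'), hi']
      rw [hstep, ih u _ hnd (by simp [hlen])]
      have hN : ntN (m :: l') u = ntN l' u := by rw [ntN_cons, if_pos hmem]
      rw [hN, ntA_zip_set m l' u cs hnd hlen i hi]
      have h3 : (ntN l' u).map (ntS l') = (ntN l' u).map (ntS (m :: l')) := by
        apply List.map_congr_left
        intro d hd
        have hdm : d ≠ ntK m := fun h => ntN_not_mem l' u d hd (h ▸ hmem)
        rw [ntS_cons, if_neg (fun h => hdm h.symm)]; ring
      rw [h3]
    · have hmem' : PySem.List.slice m none (some (-1)) ∉ u := hmem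
      have hstep : ntA_step (u, cs) m = (u ++ [ntK m], cs ++ [ntC m]) := by
        simp only [ntA_step, ntC]
        rw [if_pos hmem']
        rfl
      rw [hstep, ih (u ++ [ntK m]) (cs ++ [ntC m])
        (by rw [List.nodup_append]
            exact ⟨hnd, List.nodup_singleton _,
              by intro a ha b hb heq
                 exact absurd ((heq.trans (List.mem_singleton.mp hb)) ▸ ha) hmem⟩)
        (by simp [hlen])]
      have hN : ntN (m :: l') u = ntK m :: ntN l' (u ++ [ntK m]) := by
        rw [ntN_cons, if_neg hmem]
      rw [hN]
      simp only [Prod.mk.injEq]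
      refine ⟨by simp, ?_⟩
      have h1 : List.zipWith (fun d c => c + ntS l' d) u cs
          = List.zipWith (fun d c => c + ntS (m :: l') d) u cs := by
        apply zipWith_congr_left
        intro a ha b
        have hax : a ≠ ntK m := fun h => hmem (h ▸ ha)
        rw [ntS_cons, if_neg (fun h => hax h.symm)]; ring
      have h2 : ntC m + ntS l' (ntK m) = ntS (m :: l') (ntK m) := by
        rw [ntS_cons, if_pos rfl]
      have h3 : (ntN l' (u ++ [ntK m])).map (ntS l')
          = (ntN l' (u ++ [ntK m])).map (ntS (m :: l')) := by
        apply List.map_congr_left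
        intro d hd
        have hdm : d ≠ ntK m := fun h => ntN_not_mem l' _ d hd (by simp [h])
        rw [ntS_cons, if_neg (fun h => hdm h.symm)]; ring
      rw [List.zipWith_append (by exact hlen)]
      simp only [List.zipWith_cons_cons, List.zipWith_nil_right, List.map_cons,
        List.append_assoc, List.singleton_append]
      rw [h1, h2, h3]

-- A counts the distinct degrees (in first-occurrence order) with nonzero total coefficient
lemma ntA_char (poly : List (List Int)) :
    number_of_terms poly
      = (((ntN poly []).filter (fun d => decide (ntS poly d ≠ 0))).length : Int) := by
  unfold number_of_terms
  rw [ntA_inv poly [] [] List.nodup_nil rfl]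
  simp only [List.zipWith_nil_right, List.nil_append, List.filter_map, List.length_map]
  rfl

-- B counts, over the sorted list t, one per run key, exactly the distinct keys with nonzero ntS
lemma ntB_char : ∀ (t : List (List Int)), t.Pairwise (fun a b => ntK a ≤ ntK b) →
    ∃ v : List (List Int), v.Nodup ∧ (∀ d, d ∈ v ↔ d ∈ t.map ntK) ∧
      ntB_go t = ((v.filter (fun d => decide (ntS t d ≠ 0))).length : Int) := by
  intro t
  induction t using ntB_go.induct with
  | case1 =>
    intro _
    exact ⟨[], List.nodup_nil, by simp, by simp [ntB_go]⟩
  | case2 m rest key ih =>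
    intro hpw
    have hpc := List.pairwise_cons.mp hpw
    have hle : ∀ x ∈ rest, ntK m ≤ ntK x := hpc.1
    have hpr : rest.Pairwise (fun a b => ntK a ≤ ntK b) := hpc.2
    set P : List Int → Bool := fun x => PySem.List.slice x none (some (-1)) == key with hP
    have hPiff : ∀ x, P x = true ↔ ntK x = ntK m := by
      intro x
      simp only [hP, ntK, beq_iff_eq]
      exact Iff.rfl
    set run := rest.takeWhile P with hrun
    set rest' := rest.dropWhile P with hrest'
    have hsplit : run ++ rest' = rest := List.takeWhile_append_dropWhile
    have hrunkey : ∀ x ∈ run, ntK x = ntK m := fun x hx =>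
      (hPiff x).mp (List.mem_takeWhile_imp (by rw [← hrun]; exact hx))
    have hprr : rest'.Pairwise (fun a b => ntK a ≤ ntK b) := by
      rw [hrest']
      exact hpr.sublist (List.dropWhile_sublist P)
    have hrkey : ∀ x ∈ rest', ntK x ≠ ntK m := by
      cases hC : rest' with
      | nil => simp
      | cons z zs =>
        have heq : List.dropWhile P rest = z :: zs := hrest'.symm.trans hC
        have hw : List.dropWhile P rest ≠ [] := by rw [heq]; simp
        have hzf : P z = false := by
          have h := List.head_dropWhile_not P hw
          simpa [heq] using h
        have hzne : ntK z ≠ ntK m := by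
          intro h
          rw [← hPiff z] at h
          rw [h] at hzf
          simp at hzf
        have hzrest : z ∈ rest := (List.dropWhile_sublist P).mem (by rw [heq]; simp)
        intro x hx
        rcases List.mem_cons.mp hx with rfl | hx'
        · exact hzne
        · intro hk
          have hzx : ntK z ≤ ntK x := (List.pairwise_cons.mp (hC ▸ hprr)).1 x hx'
          have hmz : ntK m ≤ ntK z := hle z hzrest
          exact hzne (le_antisymm (hk ▸ hzx) hmz)
    obtain ⟨v', hnd', hmem', hcnt'⟩ := ih hprr
    have hdm' : ∀ d ∈ v', d ≠ ntK m := by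
      intro d hd
      rcases List.mem_map.mp ((hmem' d).mp hd) with ⟨x, hx, rfl⟩
      exact hrkey x hx
    have hSm : ntS (m :: rest) (ntK m) = ntC m + (run.map ntC).sum := by
      rw [ntS_cons, if_pos rfl, ← hsplit, ntS_append,
        ntS_eq_sum run (ntK m) hrunkey, ntS_eq_zero rest' (ntK m) hrkey]
      ring
    have hSd : ∀ d ∈ v', ntS (m :: rest) d = ntS rest' d := by
      intro d hd
      have hdm : d ≠ ntK m := hdm' d hd
      rw [ntS_cons, if_neg (fun h => hdm h.symm), ← hsplit, ntS_append,
        ntS_eq_zero run d (fun x hx h => hdm (h ▸ hrunkey x hx))]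
      ring
    refine ⟨ntK m :: v', ?_, ?_, ?_⟩
    · refine List.nodup_cons.mpr ⟨?_, hnd'⟩
      intro hmem
      exact hdm' _ hmem rfl
    · intro d
      simp only [List.mem_cons, hmem' d, List.map_cons, ← hsplit, List.map_append,
        List.mem_append]
      constructor
      · rintro (rfl | hd)
        · exact Or.inl rfl
        · exact Or.inr (Or.inr hd)
      · rintro (rfl | hd | hd)
        · exact Or.inl rfl
        · rcases List.mem_map.mp hd with ⟨x, hx, rfl⟩
          exact Or.inl (hrunkey x hx)
        · exact Or.inr hd
    · have hgo : ntB_go (m :: rest)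
          = (if (ntC m + (run.map ntC).sum) ≠ 0 then (1 : Int) else 0) + ntB_go rest' := by
        rw [ntB_go]
        rfl
      rw [hgo, hcnt', List.filter_cons]
      have hfc : List.filter (fun d => decide (ntS (m :: rest) d ≠ 0)) v'
          = List.filter (fun d => decide (ntS rest' d ≠ 0)) v' :=
        List.filter_congr (fun d hd => by rw [hSd d hd])
      rw [hfc, ← hSm]
      by_cases h : ntS (m :: rest) (ntK m) ≠ 0
      · rw [if_pos h, if_pos (by simpa using h)]
        simp only [List.length_cons]
        push_cast
        ring
      · rw [if_neg h, if_neg (by simpa using h)]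
        ring_nf

-- the two counted key sets coincide: both are the distinct degrees of poly with nonzero total

-- ===== VERDICT (by name: the statement is the Claim_ definition above) =====
theorem number_of_terms_spec : Claim_equal_number_of_terms := by
  intro poly _ _
  unfold Spec_number_of_terms number_of_terms_alt
  have hk : (fun m => PySem.List.slice m none (some (-1))) = ntK := rfl
  rw [hk]
  -- the port's `sorted` elaborated with core's List LT instance; the order lemmas use
  -- Mathlib's LinearOrder instance — the two comparators decide the same (defeq) relation
  have hbridge : @PySem.List.sorted (List Int) (List Int) List.instLT
        (fun a b => a.decidableLT b) poly ntK false
      = @PySem.List.sorted (List Int) (List Int) List.instLinearOrder.toLT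
        LinearOrder.toDecidableLT poly ntK false := by
    rw [@PySem.List.sorted_eq_foldl_insertBy (List Int) (List Int) List.instLT
          (fun a b => a.decidableLT b) poly ntK,
        @PySem.List.sorted_eq_foldl_insertBy (List Int) (List Int) List.instLinearOrder.toLT
          LinearOrder.toDecidableLT poly ntK]
    have h : (fun (acc : List (List Int)) (x : List Int) =>
          PySem.List.insertBy (fun a b => @decide _ ((ntK a).decidableLT (ntK b))) x acc)
        = (fun (acc : List (List Int)) (x : List Int) =>
          PySem.List.insertBy
            (fun a b => @decide ((ntK a) < (ntK b)) (LinearOrder.toDecidableLT _ _)) x acc) := by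
      funext acc x
      congr 1
      funext a b
      exact decide_eq_decide.mpr Iff.rfl
    rw [h]
  rw [hbridge]
  set t := @PySem.List.sorted (List Int) (List Int) List.instLinearOrder.toLT
    LinearOrder.toDecidableLT poly ntK false with ht
  have hperm : t.Perm poly := hbridge ▸ PySem.List.sorted_perm poly ntK false
  have hpw : t.Pairwise (fun a b => ntK a ≤ ntK b) :=
    ht.symm ▸ @PySem.List.sorted_pairwise (List Int) (List Int) List.instLinearOrder poly ntK
  obtain ⟨v, hndv, hmemv, hcnt⟩ := ntB_char t hpw
  rw [hcnt, ntA_char poly]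
  have hSt : ∀ d, ntS t d = ntS poly d := fun d => ntS_perm _ _ d hperm
  have hfv : v.filter (fun d => decide (ntS t d ≠ 0))
      = v.filter (fun d => decide (ntS poly d ≠ 0)) :=
    List.filter_congr (fun d _ => by rw [hSt d])
  have hpermNv : (ntN poly []).Perm v := by
    rw [List.perm_ext_iff_of_nodup (ntN_nodup poly []) hndv]
    intro d
    rw [ntN_mem_iff poly [] d, hmemv d]
    simp [(hperm.map ntK).mem_iff]
  rw [hfv]
  exact congrArg _ (hpermNv.filter _).length_eq
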